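-- pv_equiv track=rewrite | github.com/Hiepnt03/Python_codePtit | PY01039.py | check
-- ===== SOURCE A (Python) =====
-- def check(s):
--     for i in range(2,len(s),2) :
--         if s[i] != s[i-2] :
--             return False
--     for i in range(3,len(s),2) :
--         if s[i] != s[i-2] :
--             return False
--     return True
-- ===== SOURCE B (Python) =====
-- def check(s):
--     even, odd = set(), set()
--     for i, c in enumerate(s):
--         if i % 2 == 0:
--             even.add(c)
--         else:
--             odd.add(c)
--     return len(even) <= 1 and len(odd) <= 1
-- ===== Notes on version B (the rewrite author's own statement) =====
-- stated objective: alternative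
-- what changed: Replaces A's two stride-2 index loops comparing s[i] with s[i-2] by a single enumerate pass that collects the characters of each parity class into a set and checks each set has at most one distinct element.
import Mathlib
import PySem

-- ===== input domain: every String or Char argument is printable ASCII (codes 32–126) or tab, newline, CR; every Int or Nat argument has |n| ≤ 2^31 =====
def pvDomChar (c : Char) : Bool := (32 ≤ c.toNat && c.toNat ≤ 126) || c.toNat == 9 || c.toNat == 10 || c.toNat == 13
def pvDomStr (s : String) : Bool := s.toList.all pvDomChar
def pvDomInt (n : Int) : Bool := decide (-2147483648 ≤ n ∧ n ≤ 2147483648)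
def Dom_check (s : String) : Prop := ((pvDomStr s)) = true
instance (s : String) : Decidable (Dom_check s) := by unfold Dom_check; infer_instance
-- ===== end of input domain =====

-- B replaces A's two stride-2 index loops (s[i] vs s[i-2]) by one enumerate pass collecting each
-- parity class's characters into a set and checking each set has at most one distinct element.


-- ===== PORT A =====
-- for i in range(2,len(s),2): if s[i] != s[i-2]: return False   (early return = Bool all / &&)
def check (s : String) : Bool :=
  let l := s.toList
  (((PySem.List.pyRange 2 (PySem.List.len l) 2).all (fun i =>
      PySem.List.pyGetD l i ' ' == PySem.List.pyGetD l (i-2) ' ')) &&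
   ((PySem.List.pyRange 3 (PySem.List.len l) 2).all (fun i =>
      PySem.List.pyGetD l i ' ' == PySem.List.pyGetD l (i-2) ' ')))

-- ===== PORT B =====
-- one pass over enumerate(s): add each char to the set of its index parity; check both set sizes ≤ 1
def check_alt (s : String) : Bool :=
  let p := (PySem.List.enumerate s.toList 0).foldl
      (fun (p : PySem.Set Char × PySem.Set Char) ic =>
        if PySem.Int.mod ic.1 2 == 0 then (PySem.Set.add p.1 ic.2, p.2)
        else (p.1, PySem.Set.add p.2 ic.2))
      (PySem.Set.empty, PySem.Set.empty)
  decide (PySem.Set.len p.1 ≤ 1) && decide (PySem.Set.len p.2 ≤ 1)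

-- ===== PRECONDITION & SPEC =====
def Spec_check (s : String) (out : Bool) : Prop := out = check_alt s
instance (s : String) (out : Bool) : Decidable (Spec_check s out) := by unfold Spec_check; infer_instance

-- ===== CLAIM (what is proved, stated in full; the proofs are below) =====
def Claim_equal_check : Prop := ∀ (s : String), Dom_check s → Spec_check s (check s)

-- ===== LEMMAS AND PROOFS =====

/-- characters at even positions of `l` -/
def pvEvens : List Char → List Char
  | [] => []
  | [a] => [a]
  | a :: _ :: t => a :: pvEvens t

/-- characters at odd positions of `l` -/
def pvOdds (l : List Char) : List Char := pvEvens l.tail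

def pvAllEq (xs : List Char) : Prop := ∀ x ∈ xs, ∀ y ∈ xs, x = y

theorem pvEvens_cons (a : Char) (t : List Char) : pvEvens (a :: t) = a :: pvOdds t := by
  cases t <;> rfl

theorem length_pvEvens (l : List Char) : (pvEvens l).length = (l.length + 1) / 2 := by
  induction l using pvEvens.induct with
  | case1 => rfl
  | case2 a => simp [pvEvens]
  | case3 a b t ih => simp [pvEvens, ih]; omega

theorem pvEvens_getD (l : List Char) (k : Nat) (d : Char) :
    (pvEvens l).getD k d = l.getD (2*k) d := by
  induction l using pvEvens.induct generalizing k with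
  | case1 => rfl
  | case2 a => cases k with
    | zero => rfl
    | succ k => simp [pvEvens, List.getD]
  | case3 a b t ih =>
    cases k with
    | zero => rfl
    | succ k =>
      have h2 : 2 * (k + 1) = 2 * k + 1 + 1 := by omega
      simp only [pvEvens, h2, List.getD_cons_succ]
      exact ih k

theorem pvGetD_tail (l : List Char) (k : Nat) (d : Char) :
    l.tail.getD k d = l.getD (k+1) d := by
  cases l <;> simp [List.getD]

theorem pvChain_iff (xs : List Char) (d : Char) :
    (∀ k : Nat, k + 1 < xs.length → xs.getD (k+1) d = xs.getD k d) ↔ pvAllEq xs := by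
  constructor
  · intro h
    have hzero : ∀ k : Nat, k < xs.length → xs.getD k d = xs.getD 0 d := by
      intro k
      induction k with
      | zero => intro _; rfl
      | succ k ih => intro hk; rw [h k hk, ih (by omega)]
    intro x hx y hy
    obtain ⟨i, hi, rfl⟩ := List.mem_iff_getElem.mp hx
    obtain ⟨j, hj, rfl⟩ := List.mem_iff_getElem.mp hy
    rw [← List.getD_eq_getElem xs d hi, ← List.getD_eq_getElem xs d hj,
        hzero i hi, hzero j hj]
  · intro h k hk
    apply h
    · rw [List.getD_eq_getElem xs d hk]; exact List.getElem_mem hk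
    · have hk' : k < xs.length := by omega
      rw [List.getD_eq_getElem xs d hk']; exact List.getElem_mem hk'

/-- A's loop starting at r+2 with step 2 says: every in-range position 2k+2+r matches 2k+r. -/
theorem pvLoop_iff (l : List Char) (r : Nat) :
    ((PySem.List.pyRange ((r:Int)+2) (PySem.List.len l) 2).all (fun i =>
        PySem.List.pyGetD l i ' ' == PySem.List.pyGetD l (i-2) ' ')) = true
    ↔ ∀ k : Nat, 2*k + 2 + r < l.length → l.getD (2*k+2+r) ' ' = l.getD (2*k+r) ' ' := by
  rw [List.all_eq_true]
  constructor
  · intro h k hk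
    have hmem : ((2*k+2+r : Nat) : Int) ∈ PySem.List.pyRange ((r:Int)+2) (PySem.List.len l) 2 := by
      rw [PySem.List.mem_pyRange_iff_of_pos (by norm_num)]
      refine ⟨by push_cast; omega, by rw [PySem.List.len_eq]; push_cast; omega, ⟨k, by push_cast; ring⟩⟩
    have := h _ hmem
    rw [beq_iff_eq] at this
    have hcast : ((2*k+2+r : Nat) : Int) - 2 = ((2*k+r : Nat) : Int) := by push_cast; ring
    rw [hcast, PySem.List.pyGetD_natCast, PySem.List.pyGetD_natCast] at this
    exact this
  · intro h i hi
    rw [PySem.List.mem_pyRange_iff_of_pos (by norm_num)] at hi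
    obtain ⟨h1, h2, m, hm⟩ := hi
    rw [PySem.List.len_eq] at h2
    have hi0 : i = ((2*m.toNat + 2 + r : Nat) : Int) := by push_cast; omega
    have hi2 : i - 2 = ((2*m.toNat + r : Nat) : Int) := by push_cast; omega
    rw [beq_iff_eq, hi0]
    have hi2' : ((2*m.toNat + 2 + r : Nat) : Int) - 2 = ((2*m.toNat + r : Nat) : Int) := by push_cast; omega
    rw [hi2', PySem.List.pyGetD_natCast, PySem.List.pyGetD_natCast]
    apply h
    omega
theorem pvEven_iff (l : List Char) :
    (∀ k : Nat, 2*k + 2 + 0 < l.length → l.getD (2*k+2+0) ' ' = l.getD (2*k+0) ' ')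
    ↔ pvAllEq (pvEvens l) := by
  rw [← pvChain_iff (pvEvens l) ' ']
  constructor
  · intro h k hk
    rw [pvEvens_getD, pvEvens_getD]
    rw [length_pvEvens] at hk
    have h2 : 2 * (k+1) = 2*k+2+0 := by omega
    rw [h2]
    exact h k (by omega)
  · intro h k hk
    have hk' : k + 1 < (pvEvens l).length := by rw [length_pvEvens]; omega
    have := h k hk'
    rw [pvEvens_getD, pvEvens_getD] at this
    have h2 : 2 * (k+1) = 2*k+2+0 := by omega
    rw [h2] at this
    simpa using this

theorem pvOdd_iff (l : List Char) :
    (∀ k : Nat, 2*k + 2 + 1 < l.length → l.getD (2*k+2+1) ' ' = l.getD (2*k+1) ' ')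
    ↔ pvAllEq (pvOdds l) := by
  rw [pvOdds, ← pvEven_iff l.tail]
  constructor
  · intro h k hk
    rw [pvGetD_tail, pvGetD_tail]
    rw [List.length_tail] at hk
    have e1 : 2*k+2+0+1 = 2*k+2+1 := by omega
    have e2 : 2*k+0+1 = 2*k+1 := by omega
    rw [e1, e2]
    exact h k (by omega)
  · intro h k hk
    have hk' : 2*k+2+0 < l.tail.length := by rw [List.length_tail]; omega
    have := h k hk'
    rw [pvGetD_tail, pvGetD_tail] at this
    have e1 : 2*k+2+0+1 = 2*k+2+1 := by omega
    have e2 : 2*k+0+1 = 2*k+1 := by omega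
    rw [e1, e2] at this
    simpa using this

theorem pvSet_iff (xs : List Char) :
    (PySem.Set.ofList xs).length ≤ 1 ↔ pvAllEq xs := by
  constructor
  · intro h x hx y hy
    have hx' : x ∈ PySem.Set.ofList xs := (PySem.Set.mem_ofList xs x).mpr hx
    have hy' : y ∈ PySem.Set.ofList xs := (PySem.Set.mem_ofList xs y).mpr hy
    match hL : PySem.Set.ofList xs with
    | [] => rw [hL] at hx'; simp at hx'
    | [z] => rw [hL] at hx' hy'; simp at hx' hy'; rw [hx', hy']
    | a :: b :: t => rw [hL] at h; simp at h
  · intro h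
    have hnd := PySem.Set.nodup_ofList xs
    match hL : PySem.Set.ofList xs with
    | [] => simp
    | [z] => simp
    | a :: b :: t =>
      exfalso
      rw [hL] at hnd
      have ha : a ∈ PySem.Set.ofList xs := by rw [hL]; simp
      have hb : b ∈ PySem.Set.ofList xs := by rw [hL]; simp
      have hab : a = b :=
        h a ((PySem.Set.mem_ofList xs a).mp ha) b ((PySem.Set.mem_ofList xs b).mp hb)
      rw [List.nodup_cons] at hnd
      exact hnd.1 (hab ▸ List.mem_cons_self)

theorem pvMod_two (k : Int) : PySem.Int.mod k 2 = k % 2 := by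
  simp [PySem.Int.mod, Int.fmod_eq_emod]

theorem pvFold (l : List Char) : ∀ (k : Int) (e o : PySem.Set Char),
    (PySem.List.enumerate l k).foldl
      (fun (p : PySem.Set Char × PySem.Set Char) ic =>
        if PySem.Int.mod ic.1 2 == 0 then (PySem.Set.add p.1 ic.2, p.2)
        else (p.1, PySem.Set.add p.2 ic.2))
      (e, o) =
    if k % 2 = 0 then (PySem.Set.update e (pvEvens l), PySem.Set.update o (pvOdds l))
    else (PySem.Set.update e (pvOdds l), PySem.Set.update o (pvEvens l)) := by
  induction l with
  | nil => intro k e o; split <;> rfl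
  | cons a t ih =>
    intro k e o
    rw [PySem.List.enumerate_cons, List.foldl_cons]
    by_cases hk : k % 2 = 0
    · have hk1 : ¬ (k+1) % 2 = 0 := by omega
      have hc : (PySem.Int.mod k 2 == 0) = true := by rw [pvMod_two]; simp [hk]
      simp only [hc, if_true]
      rw [ih (k+1), if_neg hk1, if_pos hk, pvEvens_cons]
      rfl
    · have hk1 : (k+1) % 2 = 0 := by omega
      have hc : (PySem.Int.mod k 2 == 0) = false := by rw [pvMod_two]; simp [hk]
      simp only [hc, Bool.false_eq_true, if_false]
      rw [ih (k+1), if_pos hk1, if_neg hk, pvEvens_cons]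
      rfl

theorem pvLoopA (l : List Char) :
    ((PySem.List.pyRange 2 (PySem.List.len l) 2).all (fun i =>
        PySem.List.pyGetD l i ' ' == PySem.List.pyGetD l (i-2) ' ')) = true
    ↔ pvAllEq (pvEvens l) := by
  have h := (pvLoop_iff l 0).trans (pvEven_iff l)
  simpa using h

theorem pvLoopB (l : List Char) :
    ((PySem.List.pyRange 3 (PySem.List.len l) 2).all (fun i =>
        PySem.List.pyGetD l i ' ' == PySem.List.pyGetD l (i-2) ' ')) = true
    ↔ pvAllEq (pvOdds l) := by
  have h := (pvLoop_iff l 1).trans (pvOdd_iff l)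
  have e : ((1:Nat):Int) + 2 = 3 := by norm_num
  rw [e] at h
  exact h

theorem pvSetLen (xs : List Char) :
    PySem.Set.len (PySem.Set.update PySem.Set.empty xs) ≤ 1 ↔ pvAllEq xs := by
  have he : PySem.Set.update PySem.Set.empty xs = PySem.Set.ofList xs := rfl
  rw [he, ← pvSet_iff]
  unfold PySem.Set.len
  exact ⟨fun h => by exact_mod_cast h, fun h => by exact_mod_cast h⟩

-- ===== VERDICT =====
theorem check_spec : Claim_equal_check := by
  intro s _
  unfold Spec_check
  rw [Bool.eq_iff_iff]
  simp only [check, check_alt]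
  rw [pvFold s.toList 0 PySem.Set.empty PySem.Set.empty, if_pos (by norm_num : (0:Int) % 2 = 0)]
  rw [Bool.and_eq_true, Bool.and_eq_true, decide_eq_true_iff, decide_eq_true_iff]
  rw [pvLoopA, pvLoopB, pvSetLen, pvSetLen]
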